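-- pv_equiv track=rewrite | github.com/LisandroMoya23/Teor-a-de-la-Informacion | Decodificador/TDF/Reed-Solomon-Codificacion.py | procesar_archivo_a_bloques_rs
-- ===== SOURCE A (Python) =====
-- def dividir_byte_en_nibbles(valor_byte):
--     nibble_alto = (valor_byte >> 4) & 0x0F
--     nibble_bajo = valor_byte & 0x0F
--     return nibble_alto, nibble_bajo
--
-- def procesar_archivo_a_bloques_rs(datos):
--     nibbles = []
--     for valor_byte in datos:
--         alto, bajo = dividir_byte_en_nibbles(valor_byte)
--         nibbles.append(alto)
--         nibbles.append(bajo)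
--
--     bloques_rs = []
--     i = 0
--     while i < len(nibbles):
--         if i + 9 <= len(nibbles):
--             bloque = nibbles[i:i+9]
--             bloques_rs.append(bloque)
--             i += 9
--         else:
--             bloque = nibbles[i:] + [0] * (9 - (len(nibbles) - i))
--             bloques_rs.append(bloque)
--             break
--     return bloques_rs
-- ===== SOURCE B (Python) =====
-- def procesar_archivo_a_bloques_rs(datos):
--     bloques_rs = []
--     actual = []
--     for valor_byte in datos:
--         for nib in ((valor_byte >> 4) & 0x0F, valor_byte & 0x0F):
--             actual.append(nib)
--             if len(actual) == 9:
--                 bloques_rs.append(actual)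
--                 actual = []
--     if actual:
--         actual = actual + [0] * (9 - len(actual))
--         bloques_rs.append(actual)
--     return bloques_rs
-- ===== Notes on version B (the rewrite author's own statement) =====
-- stated objective: simpler
-- what changed: Single pass with a running block buffer flushed at length 9 (padding the last partial block at the end), instead of first materialising the full nibble list and then chunking it with an index/slice while-loop.
import Mathlib
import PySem

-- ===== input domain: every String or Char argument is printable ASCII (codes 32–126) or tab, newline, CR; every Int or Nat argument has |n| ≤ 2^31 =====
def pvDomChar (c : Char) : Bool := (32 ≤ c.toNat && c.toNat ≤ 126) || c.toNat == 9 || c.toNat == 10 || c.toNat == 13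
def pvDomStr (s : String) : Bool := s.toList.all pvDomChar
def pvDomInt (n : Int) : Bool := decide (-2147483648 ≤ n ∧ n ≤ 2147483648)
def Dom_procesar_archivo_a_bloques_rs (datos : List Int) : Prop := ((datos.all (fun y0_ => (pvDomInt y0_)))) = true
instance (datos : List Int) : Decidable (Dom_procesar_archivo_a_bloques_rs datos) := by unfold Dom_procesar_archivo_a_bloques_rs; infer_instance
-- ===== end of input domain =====

-- B fuses A's two phases into one pass with a running block buffer (objective: simpler); return values proved equal on all inputs.

-- ===== PORT A =====
-- dividir_byte_en_nibbles: Python 'v >> 4' on Int is exactly floor division by 16; '& 0x0F' is PySem.Int.band.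
def dividir_byte_en_nibbles (valor_byte : Int) : Int × Int :=
  (PySem.Int.band (PySem.Int.floordiv valor_byte 16) 15, PySem.Int.band valor_byte 15)

-- the while-loop over index i, transcribed as recursion on the not-yet-consumed suffix
-- (nibbles[i:i+9] = take 9, advancing i by 9 = drop 9; exact step for step)
def pvChunkA (ns : List Int) : List (List Int) :=
  match ns with
  | [] => []
  | n :: rest =>
    if 9 ≤ (n :: rest).length then
      (n :: rest).take 9 :: pvChunkA ((n :: rest).drop 9)
    else
      [(n :: rest) ++ List.replicate (9 - (n :: rest).length) 0]
termination_by ns.length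
decreasing_by simp

def procesar_archivo_a_bloques_rs (datos : List Int) : List (List Int) :=
  let nibbles := datos.foldl (fun acc valor_byte =>
    let p := dividir_byte_en_nibbles valor_byte
    (acc ++ [p.1]) ++ [p.2]) []
  pvChunkA nibbles

-- ===== PORT B =====
-- state = (bloques_rs, actual); appending one nibble, flushing when the block reaches 9
def pvPush (st : List (List Int) × List Int) (n : Int) : List (List Int) × List Int :=
  let actual := st.2 ++ [n]
  if actual.length = 9 then (st.1 ++ [actual], []) else (st.1, actual)

def procesar_archivo_a_bloques_rs_alt (datos : List Int) : List (List Int) :=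
  let st := datos.foldl (fun st valor_byte =>
    pvPush (pvPush st (PySem.Int.band (PySem.Int.floordiv valor_byte 16) 15))
      (PySem.Int.band valor_byte 15)) ([], [])
  if st.2 = [] then st.1 else st.1 ++ [st.2 ++ List.replicate (9 - st.2.length) 0]

-- ===== PRECONDITION & SPEC =====
def Spec_procesar_archivo_a_bloques_rs (datos : List Int) (out : List (List Int)) : Prop := out = procesar_archivo_a_bloques_rs_alt datos
instance (datos : List Int) (out : List (List Int)) : Decidable (Spec_procesar_archivo_a_bloques_rs datos out) := by unfold Spec_procesar_archivo_a_bloques_rs; infer_instance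

-- ===== CLAIM (what is proved, stated in full; the proofs are below) =====
def Claim_equal_procesar_archivo_a_bloques_rs : Prop := ∀ (datos : List Int), Dom_procesar_archivo_a_bloques_rs datos → Spec_procesar_archivo_a_bloques_rs datos (procesar_archivo_a_bloques_rs datos)

-- ===== LEMMAS AND PROOFS =====

-- the nibble stream of A, and "finish" closing B's state
def pvNibs (datos : List Int) : List Int :=
  datos.foldl (fun acc valor_byte =>
    let p := dividir_byte_en_nibbles valor_byte
    (acc ++ [p.1]) ++ [p.2]) []

def pvFinish (st : List (List Int) × List Int) : List (List Int) :=
  if st.2 = [] then st.1 else st.1 ++ [st.2 ++ List.replicate (9 - st.2.length) 0]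

lemma pvNibs_acc (datos : List Int) (acc : List Int) :
    datos.foldl (fun acc valor_byte =>
      let p := dividir_byte_en_nibbles valor_byte
      (acc ++ [p.1]) ++ [p.2]) acc = acc ++ pvNibs datos := by
  induction datos generalizing acc with
  | nil => simp [pvNibs]
  | cons v ds ih =>
    simp only [pvNibs, List.foldl_cons]
    rw [ih, ih (([] ++ _) ++ _)]
    simp

lemma pvChunkA_unfold (l : List Int) (h : l ≠ []) :
    pvChunkA l = if 9 ≤ l.length then l.take 9 :: pvChunkA (l.drop 9)
                 else [l ++ List.replicate (9 - l.length) 0] := by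
  cases l with
  | nil => exact absurd rfl h
  | cons n rest => conv_lhs => rw [pvChunkA]

lemma pvMain (ns : List Int) (bs : List (List Int)) (act : List Int) (h : act.length < 9) :
    pvFinish (ns.foldl pvPush (bs, act)) = bs ++ pvChunkA (act ++ ns) := by
  induction ns generalizing bs act with
  | nil =>
    simp only [List.foldl_nil, List.append_nil]
    cases hact : act with
    | nil =>
      simp only [pvFinish]
      rw [show pvChunkA [] = [] from by rw [pvChunkA]]
      simp
    | cons a r =>
      subst hact
      rw [pvChunkA_unfold _ (by simp)]
      rw [if_neg (by omega)]
      simp [pvFinish]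
  | cons n rest ih =>
    simp only [List.foldl_cons]
    by_cases h9 : (act ++ [n]).length = 9
    · have h8 : act.length = 8 := by simpa using h9
      have hp : pvPush (bs, act) n = (bs ++ [act ++ [n]], []) := by
        simp [pvPush, h9]
      rw [hp, ih _ _ (by simp)]
      have : act ++ n :: rest = (act ++ [n]) ++ rest := by simp
      rw [this, pvChunkA_unfold ((act ++ [n]) ++ rest) (by simp)]
      rw [if_pos (by simp; omega)]
      have ht : ((act ++ [n]) ++ rest).take 9 = act ++ [n] := List.take_left' h9
      have hd : ((act ++ [n]) ++ rest).drop 9 = rest := List.drop_left' h9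
      rw [ht, hd]
      simp
    · have h8 : ¬ act.length = 8 := by intro hc; exact h9 (by simp [hc])
      have hp : pvPush (bs, act) n = (bs, act ++ [n]) := by
        simp only [pvPush, if_neg h9]
      rw [hp, ih _ _ (by simp only [List.length_append, List.length_cons, List.length_nil]; omega)]
      have : act ++ n :: rest = (act ++ [n]) ++ rest := by simp
      rw [this]

lemma pvStream (datos : List Int) (st : List (List Int) × List Int) :
    datos.foldl (fun st valor_byte =>
      pvPush (pvPush st (PySem.Int.band (PySem.Int.floordiv valor_byte 16) 15))
        (PySem.Int.band valor_byte 15)) st = (pvNibs datos).foldl pvPush st := by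
  induction datos generalizing st with
  | nil => simp [pvNibs]
  | cons v ds ih =>
    simp only [List.foldl_cons, pvNibs]
    rw [pvNibs_acc]
    simp only [List.foldl_append]
    rw [ih]
    rfl

-- ===== VERDICT (by name: the statement is the Claim_ definition above) =====
theorem procesar_archivo_a_bloques_rs_spec : Claim_equal_procesar_archivo_a_bloques_rs := by
  intro datos _
  unfold Spec_procesar_archivo_a_bloques_rs
  show pvChunkA (pvNibs datos) = _
  unfold procesar_archivo_a_bloques_rs_alt
  show _ = pvFinish (datos.foldl _ ([], []))
  rw [pvStream, pvMain _ _ _ (by simp)]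
  simp
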